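-- pv_equiv track=rewrite | github.com/frymash/NUS-CS1010X | past_year_papers/PE/2022_rePE/re-PE-template-1.py | make_concentric_matrix
-- ===== SOURCE A (Python) =====
-- def make_concentric_matrix(m,n):
--     """ (int, int) -> Matrix
--     Return a m×n matrix where the outermost ’ring’ are all zeros,
--     then progressively in increasing number of
--     1 then 2 in ring form into the ’center’ of the matrix.
--     That is, when you connect up the same number next to each other
--     (in the same row, or in two adjacent rows), you should
--     see the ’ring’ for that number.
--     """
--     result = []
--     to_add = [0]*n
--
--     start_ind = 0
--     end_ind = n-1
--     curr_num = 0
--     # Develop the matrix until the m//2th row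
--     for _ in range(m//2+1):
--         result.append(to_add.copy())
--         start_ind += 1
--         end_ind -= 1
--         curr_num += 1
--         for i in range(start_ind, end_ind+1):
--             to_add[i] = curr_num
--
--     # Complete the matrix by adding rows in reverse
--     if m % 2 == 0:
--         result.pop()
--         for sublist in result[-1::-1]:
--             result.append(sublist)
--     else:
--         for sublist in result[-2::-1]:
--             result.append(sublist)
--     return result
-- ===== SOURCE B (Python) =====
-- def make_concentric_matrix(m, n):
--     """Closed form: each cell is its distance to the nearest border,
--     min(i, m-1-i, j, n-1-j). The column distances min(j, n-1-j) are
--     computed once and clamped at each row's distance r = min(i, m-1-i)."""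
--     if m <= 0:
--         return []
--     col = [min(j, n - 1 - j) for j in range(n)]
--
--     def row(i):
--         r = min(i, m - 1 - i)
--         return [c if c < r else r for c in col]
--
--     return [row(i) for i in range(m)]
-- ===== Notes on version B (the rewrite author's own statement) =====
-- stated objective: simpler
-- what changed: Replaces the incremental top-half row build (in-place ring filling) plus pop-and-mirror bottom half with a single nested comprehension computing each cell's distance to the nearest border, min(i, m-1-i, j, n-1-j).
-- crash fix: On negative even m (e.g. m=-2) A raises IndexError (pop from empty list); B naturally returns []. — e.g. on make_concentric_matrix(-2, 2): A raises IndexError, B returns []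
import Mathlib
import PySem

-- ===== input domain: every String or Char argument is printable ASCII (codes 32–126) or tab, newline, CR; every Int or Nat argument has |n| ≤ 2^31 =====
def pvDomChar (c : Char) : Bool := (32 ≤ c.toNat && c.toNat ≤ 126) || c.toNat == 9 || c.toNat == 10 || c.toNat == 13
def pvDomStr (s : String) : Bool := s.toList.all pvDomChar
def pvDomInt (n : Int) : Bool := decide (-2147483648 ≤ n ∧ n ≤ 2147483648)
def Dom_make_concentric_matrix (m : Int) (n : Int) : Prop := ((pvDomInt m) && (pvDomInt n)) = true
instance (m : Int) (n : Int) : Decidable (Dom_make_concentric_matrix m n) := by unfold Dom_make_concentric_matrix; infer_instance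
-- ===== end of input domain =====

-- B replaces A's incremental half-build + pop-and-mirror by the closed form
-- min(i, m-1-i, j, n-1-j) per cell (objective: simpler).

-- ===== PORT A =====
-- Python lists are arrays, so the mutated row buffer 'to_add' is ported as an Array.
-- 'pySetArr' is Python's 'xs[i] = v' (negative wraparound; the out-of-range IndexError
-- branch leaves the array unchanged — it is never reached here, since 1 <= i <= n-2).
def pySetArr (a : Array Int) (i : Int) (v : Int) : Array Int :=
  let j := if i < 0 then i + a.size else i
  if h : 0 ≤ j ∧ j.toNat < a.size then a.set j.toNat v h.2 else a

-- Loop state: (result, to_add, start_ind, end_ind, curr_num).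
def make_concentric_matrix (m : Int) (n : Int) : List (List Int) :=
  let init : List (List Int) × Array Int × Int × Int × Int :=
    ([], (PySem.List.pyRepeat [0] n).toArray, 0, n - 1, 0)
  let s := (PySem.List.pyRange 0 (PySem.Int.floordiv m 2 + 1) 1).foldl
    (fun st _ =>
      match st with
      | (result, to_add, start_ind, end_ind, curr_num) =>
        let result := result ++ [to_add.toList]  -- to_add.copy()
        let start_ind := start_ind + 1
        let end_ind := end_ind - 1
        let curr_num := curr_num + 1
        let to_add := (PySem.List.pyRange start_ind (end_ind + 1) 1).foldl
          (fun a i => pySetArr a i curr_num) to_add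
        (result, to_add, start_ind, end_ind, curr_num)) init
  let result := s.1
  if PySem.Int.mod m 2 = 0 then
    match PySem.List.pop? result with
    | none => []  -- Python raises IndexError (pop from empty list) here; excluded by Pre_
    | some (_, result) =>
        ((PySem.List.slice? result (some (-1)) none (-1)).getD []).foldl
          (fun acc sub => acc ++ [sub]) result
  else
    ((PySem.List.slice? result (some (-2)) none (-1)).getD []).foldl
      (fun acc sub => acc ++ [sub]) result

-- ===== PORT B =====
def make_concentric_matrix_alt (m : Int) (n : Int) : List (List Int) :=
  if m ≤ 0 then []
  else
    let col := (PySem.List.pyRange 0 n 1).map (fun j => min j (n - 1 - j))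
    (PySem.List.pyRange 0 m 1).map (fun i =>
      let r := min i (m - 1 - i)
      col.map (fun c => if c < r then c else r))

-- ===== PRECONDITION & SPEC =====
-- Pre_ excludes exactly the inputs on which A raises: negative even m (pop from empty list).
def Pre_make_concentric_matrix (m : Int) (n : Int) : Prop := 0 ≤ m ∨ m % 2 = 1
instance (m : Int) (n : Int) : Decidable (Pre_make_concentric_matrix m n) := by
  unfold Pre_make_concentric_matrix; infer_instance
def pvWitness_make_concentric_matrix : Int × Int := (5, 4)

-- On negative even m (e.g. m=-2) A raises IndexError (pop from empty list); B naturally returns [].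
def Raises_make_concentric_matrix (m : Int) (n : Int) : Prop := m < 0 ∧ m % 2 = 0
instance (m : Int) (n : Int) : Decidable (Raises_make_concentric_matrix m n) := by
  unfold Raises_make_concentric_matrix; infer_instance
def pvRaiseWitness_make_concentric_matrix : Int × Int := (-2, 2)
def pvRaiseWitnessOut_make_concentric_matrix : List (List Int) := []

def Spec_make_concentric_matrix (m : Int) (n : Int) (out : List (List Int)) : Prop :=
  out = make_concentric_matrix_alt m n
instance (m : Int) (n : Int) (out : List (List Int)) : Decidable (Spec_make_concentric_matrix m n out) := by
  unfold Spec_make_concentric_matrix; infer_instance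

-- ===== CLAIM (what is proved, stated in full; the proofs are below) =====
def Claim_equal_make_concentric_matrix : Prop := ∀ (m : Int) (n : Int), Dom_make_concentric_matrix m n → Pre_make_concentric_matrix m n → Spec_make_concentric_matrix m n (make_concentric_matrix m n)
def Claim_raises_make_concentric_matrix : Prop := (∀ (m : Int) (n : Int), Dom_make_concentric_matrix m n → Raises_make_concentric_matrix m n → ¬ Pre_make_concentric_matrix m n) ∧ (Dom_make_concentric_matrix (pvRaiseWitness_make_concentric_matrix.1) (pvRaiseWitness_make_concentric_matrix.2) ∧ Raises_make_concentric_matrix (pvRaiseWitness_make_concentric_matrix.1) (pvRaiseWitness_make_concentric_matrix.2) ∧ make_concentric_matrix_alt (pvRaiseWitness_make_concentric_matrix.1) (pvRaiseWitness_make_concentric_matrix.2) = pvRaiseWitnessOut_make_concentric_matrix)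

-- ===== LEMMAS AND PROOFS =====

-- closed-form top-half row: entry j is min(j, n-1-j) capped at k
def topF (n k : Int) : List Int :=
  (PySem.List.pyRange 0 n 1).map (fun j => min (min j (n - 1 - j)) k)

-- B's row i
def rowF (m n i : Int) : List Int :=
  ((PySem.List.pyRange 0 n 1).map (fun j => min j (n - 1 - j))).map
    (fun c => if c < min i (m - 1 - i) then c else min i (m - 1 - i))

lemma foldl_snoc {α : Type} (l init : List α) :
    l.foldl (fun acc s => acc ++ [s]) init = init ++ l := by
  induction l generalizing init with
  | nil => simp
  | cons x xs ih => simp [List.foldl_cons, ih]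

lemma slice_neg_one {α : Type} (xs : List α) :
    PySem.List.slice? xs (some (-1)) none (-1) = some xs.reverse := by
  rw [← PySem.List.slice?_none_none_neg_one xs]
  show PySem.List.slice? xs (some (-1)) none (-1) = PySem.List.slice? xs none none (-1)
  unfold PySem.List.slice?
  rw [show PySem.List.sliceIndices xs.length (some (-1)) none (-1)
      = PySem.List.sliceIndices xs.length none none (-1) from by
    simp [PySem.List.sliceIndices]
    omega]

lemma slice_neg_two {α : Type} (xs : List α) :
    PySem.List.slice? xs (some (-2)) none (-1) = some xs.dropLast.reverse := by
  rw [← PySem.List.slice?_none_none_neg_one xs.dropLast]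
  simp only [PySem.List.slice?, PySem.List.sliceIndices, List.length_dropLast]
  norm_num
  by_cases h : 1 < xs.length
  · rw [if_pos h, if_pos h,
      show (max (-2 + (xs.length : Int)) (-1) + 1).toNat = xs.length - 1 from by omega]
    apply List.filterMap_congr
    intro k hk
    rw [List.mem_range] at hk
    rw [List.getElem?_dropLast, if_pos (by omega)]
    congr 1
    omega
  · rw [if_neg h, if_neg h]
    simp

lemma foldl_pySetD_getElem? (v : Int) : ∀ (c : Nat) (a b : Int) (xs : List Int), 0 ≤ a →
    (b - a).toNat = c → ∀ j : Nat,
    ((PySem.List.pyRange a b 1).foldl (fun l i => PySem.List.pySetD l i v) xs)[j]? =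
      if a ≤ (j : Int) ∧ (j : Int) < b ∧ j < xs.length then some v else xs[j]? := by
  intro c
  induction c with
  | zero =>
    intro a b xs ha hc j
    rw [PySem.List.pyRange_one_eq_nil (by omega)]
    rw [if_neg (by omega)]
    rfl
  | succ c ih =>
    intro a b xs ha hc j
    rw [PySem.List.pyRange_one_cons (by omega)]
    rw [List.foldl_cons]
    rw [ih (a+1) b _ (by omega) (by omega) j]
    rw [PySem.List.pySetD_of_nonneg _ _ ha]
    simp only [List.length_set, List.getElem?_set]
    split_ifs <;> first | rfl | omega | exact (List.getElem?_eq_none (by omega)).symm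

lemma topF_getElem? (n k : Int) (j : Nat) :
    (topF n k)[j]? = if (j : Int) < n then some (min (min (j : Int) (n - 1 - (j : Int))) k) else none := by
  simp only [topF, List.getElem?_map, PySem.List.getElem?_pyRange_one]
  split_ifs <;> simp_all

lemma topF_length (n k : Int) : (topF n k).length = n.toNat := by
  simp [topF, PySem.List.length_pyRange_one]

lemma inner_loop (n c : Int) (hc : 1 ≤ c) :
    (PySem.List.pyRange c (n - c) 1).foldl (fun l i => PySem.List.pySetD l i c)
      (topF n (c - 1)) = topF n c := by
  apply List.ext_getElem?
  intro j
  rw [foldl_pySetD_getElem? c _ c (n - c) _ (by omega) rfl j]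
  rw [topF_getElem?, topF_getElem?, topF_length]
  split_ifs <;> (try rfl) <;> (try omega) <;> (congr 1; omega)

lemma init_to_add (n : Int) : PySem.List.pyRepeat [0] n = topF n 0 := by
  rw [PySem.List.pyRepeat_singleton]
  apply List.ext_getElem?
  intro j
  rw [topF_getElem?, List.getElem?_replicate]
  split_ifs <;> (try rfl) <;> (try omega) <;> (congr 1; omega)

lemma pySetArr_toList (a : Array Int) (i v : Int) (h : 0 ≤ i) :
    (pySetArr a i v).toList = PySem.List.pySetD a.toList i v := by
  unfold pySetArr
  rw [PySem.List.pySetD_of_nonneg _ _ h]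
  simp only [if_neg (show ¬ i < 0 from by omega)]
  by_cases h2 : i.toNat < a.size
  · rw [dif_pos (show 0 ≤ i ∧ i.toNat < a.size from ⟨h, h2⟩)]
    exact Array.toList_set _ _ _ _
  · rw [dif_neg (show ¬ (0 ≤ i ∧ i.toNat < a.size) from fun hc => h2 hc.2)]
    refine (List.set_eq_of_length_le ?_).symm
    rw [Array.length_toList]
    omega

lemma fold_setArr_toList (v : Int) : ∀ (c : Nat) (a b : Int) (arr : Array Int), 0 ≤ a →
    (b - a).toNat = c →
    ((PySem.List.pyRange a b 1).foldl (fun ar i => pySetArr ar i v) arr).toList =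
      (PySem.List.pyRange a b 1).foldl (fun l i => PySem.List.pySetD l i v) arr.toList := by
  intro c
  induction c with
  | zero =>
    intro a b arr ha hc
    rw [PySem.List.pyRange_one_eq_nil (by omega)]
    rfl
  | succ c ih =>
    intro a b arr ha hc
    rw [PySem.List.pyRange_one_cons (by omega), List.foldl_cons, List.foldl_cons]
    rw [ih (a + 1) b _ (by omega) (by omega), pySetArr_toList _ _ _ ha]

lemma outer_loop (n : Int) (t : Nat) :
    (PySem.List.pyRange 0 (t : Int) 1).foldl
      (fun (st : List (List Int) × Array Int × Int × Int × Int) _ =>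
        match st with
        | (result, to_add, start_ind, end_ind, curr_num) =>
          let result := result ++ [to_add.toList]
          let start_ind := start_ind + 1
          let end_ind := end_ind - 1
          let curr_num := curr_num + 1
          let to_add := (PySem.List.pyRange start_ind (end_ind + 1) 1).foldl
            (fun a i => pySetArr a i curr_num) to_add
          (result, to_add, start_ind, end_ind, curr_num))
      ([], (PySem.List.pyRepeat [0] n).toArray, 0, n - 1, 0) =
    ((PySem.List.pyRange 0 (t : Int) 1).map (topF n), (topF n t).toArray, (t : Int), n - 1 - t, (t : Int)) := by
  induction t with
  | zero =>
    rw [PySem.List.pyRange_one_eq_nil (by omega), init_to_add]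
    simp
  | succ t ih =>
    have h3 : (PySem.List.pyRange ((t : Int) + 1) ((n - 1 - (t : Int) - 1) + 1) 1).foldl
        (fun a i => pySetArr a i ((t : Int) + 1)) (topF n (t : Int)).toArray
        = (topF n ((t : Int) + 1)).toArray := by
      rw [← Array.toList_inj, fold_setArr_toList _ _ _ _ _ (by omega) rfl,
        List.toList_toArray, List.toList_toArray]
      rw [show n - 1 - (t : Int) - 1 + 1 = n - ((t : Int) + 1) from by ring,
        show topF n (t : Int) = topF n (((t : Int) + 1) - 1) from by norm_num]
      exact inner_loop n _ (by omega)
    rw [show ((t + 1 : Nat) : Int) = (t : Int) + 1 from by push_cast; ring]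
    rw [PySem.List.pyRange_one_succ_right (by omega), List.foldl_append, ih]
    simp only [List.foldl_cons, List.foldl_nil, List.map_append, List.map_cons, List.map_nil]
    rw [h3]
    simp only [Prod.mk.injEq]
    norm_num
    ring

lemma rowF_symm (m n i : Int) : rowF m n (m - 1 - i) = rowF m n i := by
  unfold rowF
  apply List.map_congr_left
  intro c _
  split_ifs <;> omega

lemma rowF_eq_topF (m n i : Int) (h : 0 ≤ i) (h' : 2 * i ≤ m - 1) : rowF m n i = topF n i := by
  unfold rowF topF
  rw [List.map_map]
  apply List.map_congr_left
  intro j hj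
  rw [PySem.List.mem_pyRange_one] at hj
  simp only [Function.comp_apply]
  split_ifs <;> omega

lemma mirror (m n a : Int) (h0 : 0 ≤ a) (h1 : a ≤ m) (h2 : m - 1 ≤ 2 * a) :
    (PySem.List.pyRange a m 1).map (rowF m n) =
      ((PySem.List.pyRange 0 (m - a) 1).map (topF n)).reverse := by
  apply List.ext_getElem
  · simp [PySem.List.length_pyRange_one]
  · intro k hk hk'
    simp only [List.getElem_map, List.getElem_reverse, PySem.List.getElem_pyRange_one]
    simp only [List.length_map, PySem.List.length_pyRange_one, List.length_reverse] at hk hk' ⊢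
    rw [show a + (k : Int) = m - 1 - (m - 1 - a - (k : Int)) from by ring, rowF_symm,
      rowF_eq_topF m n _ (by omega) (by omega)]
    congr 1
    omega

lemma first_half (m n a : Int) (h : 2 * a ≤ m + 1) :
    (PySem.List.pyRange 0 a 1).map (rowF m n) = (PySem.List.pyRange 0 a 1).map (topF n) := by
  apply List.map_congr_left
  intro i hi
  rw [PySem.List.mem_pyRange_one] at hi
  exact rowF_eq_topF m n i hi.1 (by omega)

lemma alt_eq_map_rowF (m n : Int) :
    make_concentric_matrix_alt m n = (PySem.List.pyRange 0 m 1).map (rowF m n) := by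
  unfold make_concentric_matrix_alt
  split_ifs with h
  · rw [PySem.List.pyRange_one_eq_nil (by omega)]
    rfl
  · rfl

-- ===== VERDICT (by name: the statement is the Claim_ definition above) =====
theorem make_concentric_matrix_spec : Claim_equal_make_concentric_matrix := by
  intro m n _ hpre
  unfold Pre_make_concentric_matrix at hpre
  unfold Spec_make_concentric_matrix
  rw [alt_eq_map_rowF]
  unfold make_concentric_matrix
  dsimp only
  have hfd : PySem.Int.floordiv m 2 = m / 2 := by
    unfold PySem.Int.floordiv
    simp [Int.fdiv_eq_ediv]
  have hmod : PySem.Int.mod m 2 = m % 2 := by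
    unfold PySem.Int.mod
    simp [Int.fmod_eq_emod]
  rw [hfd, hmod]
  by_cases hm : 0 ≤ m
  · have hF0 : 0 ≤ m / 2 := by omega
    rw [show m / 2 + 1 = (((m / 2 + 1).toNat : Nat) : Int) from by omega]
    rw [outer_loop n (m / 2 + 1).toNat]
    rw [show (((m / 2 + 1).toNat : Nat) : Int) = m / 2 + 1 from by omega]
    by_cases hp : m % 2 = 0
    · -- even m: pop the middle row, then mirror everything that is left
      rw [if_pos hp]
      rw [PySem.List.pyRange_one_succ_right hF0]
      simp only [List.map_append, List.map_cons, List.map_nil]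
      rw [PySem.List.pop?_last]
      dsimp only
      rw [slice_neg_one, Option.getD_some, foldl_snoc]
      rw [PySem.List.pyRange_one_append 0 (m / 2) m hF0 (by omega), List.map_append]
      rw [first_half m n (m / 2) (by omega), mirror m n (m / 2) hF0 (by omega) (by omega)]
      rw [show m - m / 2 = m / 2 from by omega]
    · -- odd m: keep the middle row, mirror the rows before it
      rw [if_neg hp]
      rw [slice_neg_two, Option.getD_some, foldl_snoc]
      rw [PySem.List.pyRange_one_succ_right hF0]
      simp only [List.map_append, List.map_cons, List.map_nil]
      rw [List.dropLast_concat]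
      rw [PySem.List.pyRange_one_append 0 (m / 2 + 1) m (by omega) (by omega), List.map_append]
      rw [first_half m n (m / 2 + 1) (by omega),
        mirror m n (m / 2 + 1) (by omega) (by omega) (by omega)]
      rw [show m - (m / 2 + 1) = m / 2 from by omega]
      rw [PySem.List.pyRange_one_succ_right hF0]
      simp
  · -- negative odd m: zero loop iterations, everything is empty
    have hp : ¬ m % 2 = 0 := by omega
    rw [if_neg hp]
    rw [PySem.List.pyRange_one_eq_nil (by omega), PySem.List.pyRange_one_eq_nil (by omega)]
    simp only [List.foldl_nil, List.map_nil]
    rw [slice_neg_two]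
    simp

@[simp] theorem make_concentric_matrix_raises : Claim_raises_make_concentric_matrix := by
  unfold Claim_raises_make_concentric_matrix
  constructor
  · intro m n _ hr hp
    unfold Raises_make_concentric_matrix at hr
    unfold Pre_make_concentric_matrix at hp
    omega
  · refine ⟨by decide, by decide, by decide⟩
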